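-- pv_equiv track=rewrite | github.com/hellojnu/telegram_registration_bot_v1 | functions.py | set_regions
-- ===== SOURCE A (Python) =====
-- def set_regions(i):
--     x = 0
--     y = 0
--     w = 380
--     h = 500
--
--     if i<=4:
--         for i1 in range(0,i):
--             x+=380
--     elif i>=5 and i<=8:
--         x=0
--         y=540
--         for i1 in range(5,i):
--             x+=380
--
--     list = [x, y, w, h]
--     return list
-- ===== SOURCE B (Python) =====
-- def set_regions(i):
--     if i <= 4:
--         x, y = 380 * max(i, 0), 0
--     elif i <= 8:
--         x, y = 380 * (i - 5), 540
--     else: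
--         x, y = 0, 0
--     return [x, y, 380, 500]
-- ===== Notes on version B (the rewrite author's own statement) =====
-- stated objective: simpler
-- what changed: Each accumulation loop (x += 380 per range step) is replaced by a closed-form multiplication, keeping the same branch structure.
import Mathlib
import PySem

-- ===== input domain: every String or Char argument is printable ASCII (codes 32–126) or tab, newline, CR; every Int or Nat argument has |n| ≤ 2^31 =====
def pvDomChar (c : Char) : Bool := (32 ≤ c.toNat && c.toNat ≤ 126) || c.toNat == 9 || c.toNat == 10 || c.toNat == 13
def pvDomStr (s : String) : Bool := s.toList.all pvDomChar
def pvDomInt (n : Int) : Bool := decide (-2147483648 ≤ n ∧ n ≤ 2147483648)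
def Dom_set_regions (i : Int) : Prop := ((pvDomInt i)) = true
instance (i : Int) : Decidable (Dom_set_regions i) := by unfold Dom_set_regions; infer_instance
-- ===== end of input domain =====

-- B replaces each 'x += 380' loop with a closed-form multiplication (simpler).


-- ===== PORT A =====
def set_regions (i : Int) : List Int :=
  let x : Int := 0
  let y : Int := 0
  let w : Int := 380
  let h : Int := 500
  let (x, y) : Int × Int :=
    if i ≤ 4 then
      ((PySem.List.pyRange 0 i 1).foldl (fun x _ => x + 380) x, y)
    else if i ≥ 5 ∧ i ≤ 8 then
      ((PySem.List.pyRange 5 i 1).foldl (fun x _ => x + 380) 0, 540)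
    else (x, y)
  [x, y, w, h]

-- ===== PORT B =====
def set_regions_alt (i : Int) : List Int :=
  let (x, y) : Int × Int :=
    if i ≤ 4 then (380 * max i 0, 0)
    else if i ≤ 8 then (380 * (i - 5), 540)
    else (0, 0)
  [x, y, 380, 500]

-- ===== PRECONDITION & SPEC =====
def Spec_set_regions (i : Int) (out : List Int) : Prop := out = set_regions_alt i
instance (i : Int) (out : List Int) : Decidable (Spec_set_regions i out) := by unfold Spec_set_regions; infer_instance

-- ===== CLAIM =====
def Claim_equal_set_regions : Prop := ∀ (i : Int), Dom_set_regions i → Spec_set_regions i (set_regions i)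

-- ===== LEMMAS AND PROOFS =====
theorem foldl_add380 (a b : Int) (init : Int) :
    (PySem.List.pyRange a b 1).foldl (fun x _ => x + 380) init = init + 380 * (b - a).toNat := by
  rw [PySem.List.foldl_add (g := fun _ => (380 : Int))]
  simp only [PySem.List.pyRange_one, List.map_map, Function.comp_def]
  rw [List.map_const', List.sum_replicate]
  simp [mul_comm]

-- ===== VERDICT =====
theorem set_regions_spec : Claim_equal_set_regions := by
  intro i _
  unfold Spec_set_regions set_regions set_regions_alt
  simp only [foldl_add380]
  split_ifs with h1 h2 h3 h4 <;> simp_all <;> omega
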